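-- pv_equiv track=rewrite | github.com/yhlimath/Spider-action-codes | sl3hecke/sl3_hecke.py | is_valid_constrained_string
-- ===== SOURCE A (Python) =====
-- def is_valid_constrained_string(string, m, x, y):
--     """Check if string satisfies (m,x,y) constraints"""
--     if len(string) != m:
--         return False
--
--     count_1, count_0, count_neg1 = 0, 0, 0
--     for element in string:
--         if element == 1:
--             count_1 += 1
--         elif element == 0:
--             count_0 += 1
--         elif element == -1:
--             count_neg1 += 1
--         else:
--             return False
--
--         if not (count_1 >= count_0 >= count_neg1):
--             return False
--
--     final_x = count_1 - count_0
--     final_y = count_0 - count_neg1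
--
--     return final_x == x and final_y == y
-- ===== SOURCE B (Python) =====
-- def is_valid_constrained_string(string, m, x, y):
--     """Check if string satisfies (m,x,y) constraints"""
--     if len(string) != m:
--         return False
--     # totals first via builtin counting passes; membership in {1,0,-1}
--     # follows from the counts covering the whole string
--     c1, c0, cn = string.count(1), string.count(0), string.count(-1)
--     if c1 + c0 + cn != len(string):
--         return False
--     if c1 - c0 != x or c0 - cn != y:
--         return False
--     # prefix invariant checked back-to-front: walking from the end,
--     # (c1, c0, cn) are always the counts of the prefix ending just after e
--     for e in reversed(string):
--         if not (c1 >= c0 >= cn):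
--             return False
--         if e == 1:
--             c1 -= 1
--         elif e == 0:
--             c0 -= 1
--         else:
--             cn -= 1
--     return True
-- ===== Notes on version B (the rewrite author's own statement) =====
-- stated objective: alternative
-- what changed: B first computes the three totals with builtin list.count passes (deriving membership in {1,0,-1} from the counts summing to the length), checks the final x/y equations on the totals, and then verifies the prefix invariant by walking the string backwards while decrementing the totals, instead of A's single forward loop accumulating three counters with inline validity and invariant checks.
import Mathlib
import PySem

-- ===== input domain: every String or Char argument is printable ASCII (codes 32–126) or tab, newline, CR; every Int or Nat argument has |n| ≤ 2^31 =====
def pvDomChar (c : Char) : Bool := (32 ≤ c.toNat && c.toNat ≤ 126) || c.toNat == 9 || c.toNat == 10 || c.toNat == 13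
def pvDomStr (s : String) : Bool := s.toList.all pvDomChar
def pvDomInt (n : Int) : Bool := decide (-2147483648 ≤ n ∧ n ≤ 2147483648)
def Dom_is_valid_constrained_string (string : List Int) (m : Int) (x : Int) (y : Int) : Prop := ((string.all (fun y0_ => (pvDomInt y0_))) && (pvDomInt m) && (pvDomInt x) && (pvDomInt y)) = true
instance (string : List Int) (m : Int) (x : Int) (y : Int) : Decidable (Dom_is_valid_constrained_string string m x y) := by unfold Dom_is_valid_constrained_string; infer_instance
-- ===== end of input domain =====

-- B computes the three totals first with builtin counting passes (membership in {1,0,-1}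
-- follows from the counts covering the length) and then checks the prefix invariant by a
-- backward walk that decrements the totals, instead of A's single forward loop with three
-- running counters (objective: alternative).

-- ===== PORT A =====
def pvALoop (rest : List Int) (c1 c0 cn x y : Int) : Bool :=
  match rest with
  | [] => (c1 - c0 == x) && (c0 - cn == y)
  | e :: t =>
    if e == 1 then
      if c1 + 1 ≥ c0 ∧ c0 ≥ cn then pvALoop t (c1 + 1) c0 cn x y else false
    else if e == 0 then
      if c1 ≥ c0 + 1 ∧ c0 + 1 ≥ cn then pvALoop t c1 (c0 + 1) cn x y else false
    else if e == -1 then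
      if c1 ≥ c0 ∧ c0 ≥ cn + 1 then pvALoop t c1 c0 (cn + 1) x y else false
    else false

def is_valid_constrained_string (string : List Int) (m : Int) (x : Int) (y : Int) : Bool :=
  if (string.length : Int) ≠ m then false
  else pvALoop string 0 0 0 x y

-- ===== PORT B =====
-- backward walk over reversed(string): (c1, c0, cn) are the counts of the prefix ending at e
def pvBLoop (rev : List Int) (c1 c0 cn : Int) : Bool :=
  match rev with
  | [] => true
  | e :: t =>
    if ¬ (c1 ≥ c0 ∧ c0 ≥ cn) then false
    else if e == 1 then pvBLoop t (c1 - 1) c0 cn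
    else if e == 0 then pvBLoop t c1 (c0 - 1) cn
    else pvBLoop t c1 c0 (cn - 1)

def is_valid_constrained_string_alt (string : List Int) (m : Int) (x : Int) (y : Int) : Bool :=
  if (string.length : Int) ≠ m then false
  else
    let c1 : Int := PySem.List.count string 1
    let c0 : Int := PySem.List.count string 0
    let cn : Int := PySem.List.count string (-1)
    if c1 + c0 + cn ≠ (string.length : Int) then false
    else if c1 - c0 ≠ x ∨ c0 - cn ≠ y then false
    else pvBLoop string.reverse c1 c0 cn

-- ===== PRECONDITION & SPEC =====
def Spec_is_valid_constrained_string (string : List Int) (m : Int) (x : Int) (y : Int) (out : Bool) : Prop := out = is_valid_constrained_string_alt string m x y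
instance (string : List Int) (m : Int) (x : Int) (y : Int) (out : Bool) : Decidable (Spec_is_valid_constrained_string string m x y out) := by unfold Spec_is_valid_constrained_string; infer_instance

-- ===== CLAIM (what is proved, stated in full; the proofs are below) =====
def Claim_equal_is_valid_constrained_string : Prop := ∀ (string : List Int) (m : Int) (x : Int) (y : Int), Dom_is_valid_constrained_string string m x y → Spec_is_valid_constrained_string string m x y (is_valid_constrained_string string m x y)

-- ===== LEMMAS AND PROOFS =====

-- integer-valued counts of 1, 0, -1 in a list
def pvC1 (s : List Int) : Int := s.count 1
def pvC0 (s : List Int) : Int := s.count 0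
def pvCN (s : List Int) : Int := s.count (-1)

@[simp] lemma pvC1_cons (e : Int) (t : List Int) :
    pvC1 (e :: t) = pvC1 t + if e = 1 then 1 else 0 := by
  by_cases h : e = 1
  · subst h; simp [pvC1, List.count_cons]
  · simp [pvC1, List.count_cons, h, Ne.symm h]
@[simp] lemma pvC0_cons (e : Int) (t : List Int) :
    pvC0 (e :: t) = pvC0 t + if e = 0 then 1 else 0 := by
  by_cases h : e = 0
  · subst h; simp [pvC0, List.count_cons]
  · simp [pvC0, List.count_cons, h, Ne.symm h]
@[simp] lemma pvCN_cons (e : Int) (t : List Int) :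
    pvCN (e :: t) = pvCN t + if e = -1 then 1 else 0 := by
  by_cases h : e = -1
  · subst h; simp [pvCN, List.count_cons]
  · simp [pvCN, List.count_cons, h, Ne.symm h]

@[simp] lemma pvC1_append (t : List Int) (e : Int) :
    pvC1 (t ++ [e]) = pvC1 t + if e = 1 then 1 else 0 := by
  by_cases h : e = 1
  · subst h; simp [pvC1, List.count_append]
  · simp [pvC1, List.count_append, h, Ne.symm h]
@[simp] lemma pvC0_append (t : List Int) (e : Int) :
    pvC0 (t ++ [e]) = pvC0 t + if e = 0 then 1 else 0 := by
  by_cases h : e = 0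
  · subst h; simp [pvC0, List.count_append]
  · simp [pvC0, List.count_append, h, Ne.symm h]
@[simp] lemma pvCN_append (t : List Int) (e : Int) :
    pvCN (t ++ [e]) = pvCN t + if e = -1 then 1 else 0 := by
  by_cases h : e = -1
  · subst h; simp [pvCN, List.count_append]
  · simp [pvCN, List.count_append, h, Ne.symm h]

@[simp] lemma pvC1_nil : pvC1 [] = 0 := rfl
@[simp] lemma pvC0_nil : pvC0 [] = 0 := rfl
@[simp] lemma pvCN_nil : pvCN [] = 0 := rfl

-- the prefix invariant of the task, with offsets (a,b,c) added to the prefix counts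
def pvInv (a b c : Int) (p : List Int) : Prop :=
  a + pvC1 p ≥ b + pvC0 p ∧ b + pvC0 p ≥ c + pvCN p

def pvPref (a b c : Int) (s : List Int) : Prop :=
  ∀ p, p <+: s → p ≠ [] → pvInv a b c p

lemma pvPref_nil (a b c : Int) : pvPref a b c [] := by
  intro p hp hne; exact absurd (List.prefix_nil.mp hp) hne

lemma pvInv_cons (a b c e : Int) (q : List Int) :
    pvInv a b c (e :: q) ↔
      pvInv (a + if e = 1 then 1 else 0) (b + if e = 0 then 1 else 0)
            (c + if e = -1 then 1 else 0) q := by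
  unfold pvInv; constructor <;> intro h <;> constructor <;> [skip; skip; skip; skip] <;>
    simp only [pvC1_cons, pvC0_cons, pvCN_cons] at * <;> omega

lemma pvPref_cons (a b c e : Int) (t : List Int) :
    pvPref a b c (e :: t) ↔
      pvInv a b c [e] ∧
      pvPref (a + if e = 1 then 1 else 0) (b + if e = 0 then 1 else 0)
             (c + if e = -1 then 1 else 0) t := by
  constructor
  · intro h
    refine ⟨h [e] ⟨t, rfl⟩ (by simp), fun q hq hne => ?_⟩
    exact (pvInv_cons a b c e q).mp (h (e :: q) ((List.prefix_cons_iff).mpr (Or.inr ⟨q, rfl, hq⟩)) (by simp))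
  · rintro ⟨h1, h2⟩ p hp hne
    rcases List.prefix_cons_iff.mp hp with rfl | ⟨q, rfl, hq⟩
    · exact absurd rfl hne
    · rcases eq_or_ne q [] with rfl | hqne
      · exact h1
      · exact (pvInv_cons a b c e q).mpr (h2 q hq hqne)

lemma pvPref_concat (a b c e : Int) (t : List Int) :
    pvPref a b c (t ++ [e]) ↔ pvPref a b c t ∧ pvInv a b c (t ++ [e]) := by
  constructor
  · intro h
    exact ⟨fun p hp hne => h p (hp.trans (List.prefix_append _ _)) hne,
           h _ List.prefix_rfl (by simp)⟩
  · rintro ⟨h1, h2⟩ p hp hne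
    rcases List.prefix_concat_iff.mp hp with rfl | hp'
    · exact h2
    · exact h1 p hp' hne

-- the counts of 1, 0, -1 cover the length iff every element is one of them
lemma pvSumLe (s : List Int) :
    s.count 1 + s.count 0 + s.count (-1) ≤ s.length := by
  induction s with
  | nil => simp
  | cons e t ih =>
    simp only [List.count_cons, List.length_cons]
    by_cases h1 : e = 1 <;> by_cases h0 : e = 0 <;> by_cases hn : e = -1 <;>
      simp_all <;> omega

lemma pvSumLeI (s : List Int) : pvC1 s + pvC0 s + pvCN s ≤ (s.length : Int) := by
  have := pvSumLe s
  simp only [pvC1, pvC0, pvCN]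
  push_cast
  omega

lemma pvCountsCover (s : List Int) :
    (pvC1 s + pvC0 s + pvCN s = (s.length : Int)) ↔ ∀ e ∈ s, e = 1 ∨ e = 0 ∨ e = -1 := by
  induction s with
  | nil => simp [pvC1, pvC0, pvCN]
  | cons e t ih =>
    constructor
    · intro h f hf
      by_cases hmem : e = 1 ∨ e = 0 ∨ e = -1
      · have hsum : pvC1 t + pvC0 t + pvCN t = (t.length : Int) := by
          rcases hmem with rfl | rfl | rfl <;>
            simp only [pvC1_cons, pvC0_cons, pvCN_cons, List.length_cons] at h <;>
            norm_num at h <;> push_cast at h ⊢ <;> omega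
        rcases List.mem_cons.mp hf with heq | hf
        · exact heq ▸ hmem
        · exact ih.mp hsum f hf
      · exfalso
        push_neg at hmem
        obtain ⟨h1, h0, hn⟩ := hmem
        have hle := pvSumLeI t
        simp only [pvC1_cons, pvC0_cons, pvCN_cons, List.length_cons, if_neg h1, if_neg h0,
          if_neg hn] at h
        push_cast at h
        omega
    · intro h
      have hmem := h e (List.mem_cons_self)
      have hsum := ih.mpr (fun f hf => h f (List.mem_cons_of_mem _ hf))
      rcases hmem with rfl | rfl | rfl <;>
        simp only [pvC1_cons, pvC0_cons, pvCN_cons, List.length_cons] <;>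
        norm_num <;> push_cast <;> omega

-- A's loop returns false as soon as an element outside {1,0,-1} is reached
lemma pvALoop_invalid (rest : List Int) (c1 c0 cn x y : Int)
    (h : ∃ e ∈ rest, e ≠ 1 ∧ e ≠ 0 ∧ e ≠ -1) :
    pvALoop rest c1 c0 cn x y = false := by
  induction rest generalizing c1 c0 cn with
  | nil => rcases h with ⟨e, he, _⟩; cases he
  | cons e t ih =>
    rcases h with ⟨f, hf, hf1⟩
    simp only [List.mem_cons] at hf
    by_cases h1 : e = 1
    · have : ∃ g ∈ t, g ≠ 1 ∧ g ≠ 0 ∧ g ≠ -1 := by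
        rcases hf with rfl | hmem
        · exact absurd h1 hf1.1
        · exact ⟨f, hmem, hf1⟩
      simp [pvALoop, h1, ih _ _ _ this]
    · by_cases h0 : e = 0
      · have : ∃ g ∈ t, g ≠ 1 ∧ g ≠ 0 ∧ g ≠ -1 := by
          rcases hf with rfl | hmem
          · exact absurd h0 hf1.2.1
          · exact ⟨f, hmem, hf1⟩
        simp [pvALoop, h0, ih _ _ _ this]
      · by_cases hn : e = -1
        · have : ∃ g ∈ t, g ≠ 1 ∧ g ≠ 0 ∧ g ≠ -1 := by
            rcases hf with rfl | hmem
            · exact absurd hn hf1.2.2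
            · exact ⟨f, hmem, hf1⟩
          simp [pvALoop, hn, ih _ _ _ this]
        · simp [pvALoop, h1, h0, hn]

-- characterisation of A's loop on valid elements
lemma pvALoop_char (s : List Int) (a b c x y : Int)
    (h : ∀ e ∈ s, e = 1 ∨ e = 0 ∨ e = -1) :
    pvALoop s a b c x y = true ↔
      (pvPref a b c s ∧ a + pvC1 s - (b + pvC0 s) = x ∧ b + pvC0 s - (c + pvCN s) = y) := by
  induction s generalizing a b c with
  | nil =>
    simp only [pvALoop, Bool.and_eq_true, beq_iff_eq,
      show pvC1 ([] : List Int) = 0 from rfl, show pvC0 ([] : List Int) = 0 from rfl,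
      show pvCN ([] : List Int) = 0 from rfl]
    constructor
    · rintro ⟨hx, hy⟩; exact ⟨pvPref_nil a b c, by omega, by omega⟩
    · rintro ⟨_, hx, hy⟩; exact ⟨by omega, by omega⟩
  | cons e t ih =>
    have ht : ∀ f ∈ t, f = 1 ∨ f = 0 ∨ f = -1 := fun f hf => h f (List.mem_cons_of_mem _ hf)
    rcases h e List.mem_cons_self with rfl | rfl | rfl
    all_goals (
      simp only [pvALoop]
      norm_num
      rw [ih _ _ _ ht, pvPref_cons]
      norm_num [pvInv]
      constructor
      · rintro ⟨hinv, hp, hx, hy⟩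
        exact ⟨⟨by omega, by exact hp⟩, by omega, by omega⟩
      · rintro ⟨⟨hinv, hp⟩, hx, hy⟩
        exact ⟨by omega, by exact hp, by omega, by omega⟩)

-- characterisation of B's backward walk on valid elements
lemma pvBLoop_char (s : List Int) (a b c : Int)
    (h : ∀ e ∈ s, e = 1 ∨ e = 0 ∨ e = -1) :
    pvBLoop s.reverse (a + pvC1 s) (b + pvC0 s) (c + pvCN s) = true ↔ pvPref a b c s := by
  induction s using List.reverseRecOn with
  | nil =>
    simp only [List.reverse_nil, pvBLoop, true_iff]
    exact pvPref_nil a b c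
  | append_singleton t e ih =>
    have ht : ∀ f ∈ t, f = 1 ∨ f = 0 ∨ f = -1 := fun f hf => h f (by simp [hf])
    have hrev : (t ++ [e]).reverse = e :: t.reverse := by simp
    rw [hrev, pvPref_concat]
    rcases h e (by simp) with rfl | rfl | rfl
    all_goals (
      simp only [pvBLoop]
      norm_num
      rw [pvInv]
      constructor
      · rintro ⟨hinv, hrec⟩
        refine ⟨?_, ?_⟩
        · have := ih ht
          first
          | exact this.mp (by convert hrec using 2 <;> push_cast <;> ring)
          | exact this.mp (by convert hrec using 2 <;> push_cast <;> ring)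
        · simp only [pvC1_append, pvC0_append, pvCN_append]; norm_num; omega
      · rintro ⟨hp, hinv⟩
        simp only [pvC1_append, pvC0_append, pvCN_append] at hinv; norm_num at hinv
        refine ⟨by omega, ?_⟩
        have := (ih ht).mpr hp
        first
        | exact (by convert this using 2 <;> push_cast <;> ring)
        | exact (by convert this using 2 <;> push_cast <;> ring))

-- ===== VERDICT (by name: the statement is the Claim_ definition above) =====
theorem is_valid_constrained_string_spec : Claim_equal_is_valid_constrained_string := by
  intro s m x y _
  unfold Spec_is_valid_constrained_string is_valid_constrained_string is_valid_constrained_string_alt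
  by_cases hm : (s.length : Int) ≠ m
  · simp [hm]
  · rw [if_neg hm, if_neg hm]
    simp only [PySem.List.count_eq]
    by_cases hv : ∀ e ∈ s, e = 1 ∨ e = 0 ∨ e = -1
    · have hsum : pvC1 s + pvC0 s + pvCN s = (s.length : Int) := (pvCountsCover s).mpr hv
      rw [if_neg (by simp only [pvC1, pvC0, pvCN] at hsum; push_cast at hsum ⊢; omega)]
      by_cases hxy : pvC1 s - pvC0 s = x ∧ pvC0 s - pvCN s = y
      · rw [if_neg (by simp only [pvC1, pvC0, pvCN] at hxy; push_cast; omega)]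
        rw [Bool.eq_iff_iff, pvALoop_char s 0 0 0 x y hv]
        have hB := pvBLoop_char s 0 0 0 hv
        simp only [zero_add] at hB
        rw [show ((s.count 1 : Int)) = pvC1 s from rfl, show ((s.count 0 : Int)) = pvC0 s from rfl,
            show ((s.count (-1) : Int)) = pvCN s from rfl, hB]
        constructor
        · rintro ⟨hp, _, _⟩; exact hp
        · intro hp; exact ⟨hp, by omega, by omega⟩
      · rw [if_pos (by simp only [pvC1, pvC0, pvCN] at hxy; push_cast; omega)]
        rw [Bool.eq_iff_iff, pvALoop_char s 0 0 0 x y hv]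
        simp only [Bool.false_eq_true, iff_false]
        rintro ⟨_, hx, hy⟩
        exact hxy ⟨by omega, by omega⟩
    · push_neg at hv
      have hex : ∃ e ∈ s, e ≠ 1 ∧ e ≠ 0 ∧ e ≠ -1 := hv
      have hsum : pvC1 s + pvC0 s + pvCN s ≠ (s.length : Int) := by
        intro hc
        rcases hex with ⟨e, he, h1, h0, hn⟩
        exact absurd ((pvCountsCover s).mp hc e he) (by simp [h1, h0, hn])
      rw [if_pos (by simp only [pvC1, pvC0, pvCN] at hsum; push_cast at hsum ⊢; omega)]
      exact pvALoop_invalid s 0 0 0 x y hex
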